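-- pv_equiv track=rewrite | github.com/dqkqd/advent-of-code | python/aoc/y2023/day11.py | pairwise_distance_sum
-- ===== SOURCE A (Python) =====
-- def pairwise_distance_sum(arr: list[int]) -> int:
--     arr_sum = sum(arr)
--     n = len(arr)
--     total = 0
--     for i, a in enumerate(arr):
--         total += arr_sum - (n - i) * a
--         arr_sum -= a
--     return total
-- ===== SOURCE B (Python) =====
-- def pairwise_distance_sum(arr: list[int]) -> int:
--     n = len(arr)
--     return sum(a * (2 * i - n + 1) for i, a in enumerate(arr))
-- ===== Notes on version B (the rewrite author's own statement) =====
-- stated objective: simpler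
-- what changed: Replaces the stateful scan maintaining a running suffix sum with a stateless closed-form mapped sum: each element a at index i contributes a*(2*i - n + 1).
import Mathlib
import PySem

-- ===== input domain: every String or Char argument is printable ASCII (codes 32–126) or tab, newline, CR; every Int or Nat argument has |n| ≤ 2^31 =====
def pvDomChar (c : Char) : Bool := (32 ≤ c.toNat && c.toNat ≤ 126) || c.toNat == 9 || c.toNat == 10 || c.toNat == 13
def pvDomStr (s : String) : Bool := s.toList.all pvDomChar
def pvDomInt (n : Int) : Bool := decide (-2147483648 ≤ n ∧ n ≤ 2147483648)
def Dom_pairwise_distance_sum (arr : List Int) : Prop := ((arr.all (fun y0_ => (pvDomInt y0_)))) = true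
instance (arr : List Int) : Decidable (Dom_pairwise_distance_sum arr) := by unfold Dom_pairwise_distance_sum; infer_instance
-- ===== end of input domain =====

-- B replaces A's stateful scan (running suffix sum) with a stateless closed-form per-element sum; objective: simpler.

-- ===== PORT A =====
-- transliteration of A: arr_sum = sum(arr); loop over enumerate(arr) with state (arr_sum, total)
def pairwise_distance_sum (arr : List Int) : Int :=
  let arr_sum : Int := arr.foldl (· + ·) 0
  let n : Int := arr.length
  let st := (PySem.List.enumerate arr 0).foldl
    (fun (st : Int × Int) (p : Int × Int) => (st.1 - p.2, st.2 + (st.1 - (n - p.1) * p.2)))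
    (arr_sum, 0)
  st.2

-- ===== PORT B =====
-- transliteration of B: sum(a * (2*i - n + 1) for i, a in enumerate(arr))
def pairwise_distance_sum_alt (arr : List Int) : Int :=
  let n : Int := arr.length
  ((PySem.List.enumerate arr 0).map (fun p => p.2 * (2 * p.1 - n + 1))).sum

-- ===== PRECONDITION & SPEC =====
def Spec_pairwise_distance_sum (arr : List Int) (out : Int) : Prop := out = pairwise_distance_sum_alt arr
instance (arr : List Int) (out : Int) : Decidable (Spec_pairwise_distance_sum arr out) := by unfold Spec_pairwise_distance_sum; infer_instance

-- ===== CLAIM (what is proved, stated in full; the proofs are below) =====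
def Claim_equal_pairwise_distance_sum : Prop := ∀ (arr : List Int), Dom_pairwise_distance_sum arr → Spec_pairwise_distance_sum arr (pairwise_distance_sum arr)

-- ===== LEMMAS AND PROOFS =====

-- A's fold in closed form: starting from (sum0, t0), the final total is
-- t0 + L*sum0 minus the sum of (L - 1 + s + n - 2*i) * a over the enumerated tail.
theorem pdsA_fold_closed (n : Int) (xs : List Int) : ∀ (s sum0 t0 : Int),
    ((PySem.List.enumerate xs s).foldl
      (fun (st : Int × Int) (p : Int × Int) => (st.1 - p.2, st.2 + (st.1 - (n - p.1) * p.2)))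
      (sum0, t0)).2
    = t0 + (xs.length : Int) * sum0
      - ((PySem.List.enumerate xs s).map
          (fun p => ((xs.length : Int) - 1 + s + n - 2 * p.1) * p.2)).sum := by
  induction xs with
  | nil => intro s sum0 t0; simp [PySem.List.enumerate_nil]
  | cons a xs ih =>
    intro s sum0 t0
    simp only [PySem.List.enumerate_cons, List.foldl_cons, List.map_cons, List.sum_cons,
      List.length_cons]
    rw [ih (s + 1) (sum0 - a) (t0 + (sum0 - (n - s) * a))]
    have hcoef : ∀ p : Int × Int,
        ((xs.length : Int) - 1 + (s + 1) + n - 2 * p.1) * p.2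
        = (((xs.length : Int) + 1) - 1 + s + n - 2 * p.1) * p.2 := by
      intro p; ring
    rw [List.map_congr_left (fun p _ => hcoef p)]
    push_cast
    ring

-- combine the L*sum term with the coefficient sum, termwise
theorem pdsA_sum_combine (L : Int) (l : List (Int × Int)) :
    L * (l.map (fun p : Int × Int => p.2)).sum
      - (l.map (fun p => (L - 1 + 0 + L - 2 * p.1) * p.2)).sum
    = (l.map (fun p => p.2 * (2 * p.1 - L + 1))).sum := by
  induction l with
  | nil => simp
  | cons a l ih =>
    simp only [List.map_cons, List.sum_cons]
    rw [← ih]; ring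

theorem pds_foldl_sum (xs : List Int) : xs.foldl (· + ·) 0 = xs.sum := by
  simp [List.sum_eq_foldl]

-- ===== VERDICT (by name: the statement is the Claim_ definition above) =====
theorem pairwise_distance_sum_spec : Claim_equal_pairwise_distance_sum := by
  intro arr _
  unfold Spec_pairwise_distance_sum pairwise_distance_sum pairwise_distance_sum_alt
  simp only []
  rw [pdsA_fold_closed (arr.length : Int) arr 0 (arr.foldl (· + ·) 0) 0, pds_foldl_sum]
  have hsum : arr.sum = ((PySem.List.enumerate arr 0).map (fun p : Int × Int => p.2)).sum := by
    rw [PySem.List.map_snd_enumerate]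
  rw [hsum]
  have := pdsA_sum_combine (arr.length : Int) (PySem.List.enumerate arr 0)
  rw [← this]
  ring
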